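-- pv_equiv track=rewrite | github.com/nuresuke/exercises | Akinator/train_qusestionselectmodel.py | filter_candidates_by_answers
-- ===== SOURCE A (Python) =====
-- def filter_candidates_by_answers(sample, candidates, candidate_features):
--     """回答に基づいて候補を絞り込む"""
--     filtered_candidates = []
--     for candidate_idx in candidates:
--         is_valid = True
--         for q_idx, answer in enumerate(sample):
--             if answer == -1:
--                 continue
--             if candidate_features[candidate_idx][q_idx] != answer:
--                 is_valid = False
--                 break
--         if is_valid:
--             filtered_candidates.append(candidate_idx)
--     return filtered_candidates
-- ===== SOURCE B (Python) =====
-- def filter_candidates_by_answers(sample, candidates, candidate_features):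
--     """回答に基づいて候補を絞り込む"""
--     survivors = list(candidates)
--     for q_idx, answer in enumerate(sample):
--         if answer == -1:
--             continue
--         survivors = [c for c in survivors
--                      if candidate_features[c][q_idx] == answer]
--     return survivors
-- ===== Notes on version B (the rewrite author's own statement) =====
-- stated objective: alternative
-- what changed: Inverts the loop nesting: instead of an outer loop over candidates that rescans the sample with a break/flag per candidate, B loops once over the answered questions and at each one narrows the whole surviving candidate pool by a filter, returning the final pool.
import Mathlib
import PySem

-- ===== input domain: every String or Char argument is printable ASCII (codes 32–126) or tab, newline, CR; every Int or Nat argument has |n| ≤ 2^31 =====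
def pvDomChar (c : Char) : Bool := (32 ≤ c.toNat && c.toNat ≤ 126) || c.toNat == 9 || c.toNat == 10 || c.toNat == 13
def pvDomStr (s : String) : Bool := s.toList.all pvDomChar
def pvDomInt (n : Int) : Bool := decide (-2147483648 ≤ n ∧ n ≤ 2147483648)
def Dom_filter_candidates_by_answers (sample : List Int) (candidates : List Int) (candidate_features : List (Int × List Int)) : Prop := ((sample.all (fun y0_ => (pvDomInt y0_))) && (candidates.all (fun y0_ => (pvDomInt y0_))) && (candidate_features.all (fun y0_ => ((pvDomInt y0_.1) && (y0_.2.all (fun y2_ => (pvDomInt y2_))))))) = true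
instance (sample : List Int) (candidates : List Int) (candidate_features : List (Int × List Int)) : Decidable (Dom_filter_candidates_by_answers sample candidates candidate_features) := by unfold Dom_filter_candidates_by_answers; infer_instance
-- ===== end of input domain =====

-- B inverts the loop nesting: it walks the answered questions once and narrows the whole
-- surviving candidate pool at each one (objective: alternative); same return values and same
-- raising inputs as A.
-- ===== PORT A =====
-- dict lookup candidate_features[c] (first matching key; [] default only reachable outside Pre_)
def pvA_row (candidate_features : List (Int × List Int)) (c : Int) : List Int :=
  ((candidate_features.find? (fun r => r.1 == c)).map (·.2)).getD []

-- the inner 'for q_idx, answer in enumerate(sample)' loop with continue/break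
def pvA_loop (candidate_features : List (Int × List Int)) (c : Int) : List (Int × Int) → Bool
  | [] => true
  | (q_idx, answer) :: rest =>
    if answer == -1 then pvA_loop candidate_features c rest
    else if !(PySem.List.pyGetD (pvA_row candidate_features c) q_idx 0 == answer) then false
    else pvA_loop candidate_features c rest

def filter_candidates_by_answers (sample : List Int) (candidates : List Int) (candidate_features : List (Int × List Int)) : List Int :=
  candidates.foldl
    (fun acc candidate_idx =>
      if pvA_loop candidate_features candidate_idx (PySem.List.enumerate sample 0) then acc ++ [candidate_idx]
      else acc)
    []

-- ===== PORT B =====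
-- survivors = list(candidates); for q_idx, answer in enumerate(sample): skip -1, else
-- survivors = [c for c in survivors if candidate_features[c][q_idx] == answer]
def filter_candidates_by_answers_alt (sample : List Int) (candidates : List Int) (candidate_features : List (Int × List Int)) : List Int :=
  (PySem.List.enumerate sample 0).foldl
    (fun survivors p =>
      if p.2 == -1 then survivors
      else survivors.filter (fun c =>
        PySem.List.pyGetD (((candidate_features.find? (fun r => r.1 == c)).map (·.2)).getD []) p.1 0 == p.2))
    candidates

-- ===== PRECONDITION & SPEC =====
-- Pre_ states exactly when the Python A returns (= when B returns): either no question is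
-- answered (the features dict is never touched), or every listed candidate is a key of
-- candidate_features and its row either covers every answered index or mismatches at some
-- answered index reached before the first uncovered one (the break fires before the IndexError).
def Pre_filter_candidates_by_answers (sample : List Int) (candidates : List Int) (candidate_features : List (Int × List Int)) : Prop :=
  (PySem.List.enumerate sample 0).filter (fun p => p.2 != -1) = [] ∨
  ∀ c ∈ candidates,
    (candidate_features.find? (fun r => r.1 == c)).isSome = true ∧
    ((∀ p ∈ (PySem.List.enumerate sample 0).filter (fun p => p.2 != -1),
        p.1 < (((((candidate_features.find? (fun r => r.1 == c)).map (·.2)).getD []).length : Int))) ∨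
     (∃ p ∈ ((PySem.List.enumerate sample 0).filter (fun p => p.2 != -1)).takeWhile
              (fun p => decide (p.1 < ((((candidate_features.find? (fun r => r.1 == c)).map (·.2)).getD []).length : Int))),
        PySem.List.pyGetD ((((candidate_features.find? (fun r => r.1 == c)).map (·.2)).getD [])) p.1 0 ≠ p.2))
instance (sample : List Int) (candidates : List Int) (candidate_features : List (Int × List Int)) : Decidable (Pre_filter_candidates_by_answers sample candidates candidate_features) := by unfold Pre_filter_candidates_by_answers; infer_instance

def pvWitness_filter_candidates_by_answers : List Int × List Int × (List (Int × List Int)) :=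
  ([0, -1, 2], [1, 3, 1], [(1, [0, 9, 2]), (3, [0, 7, 2])])

def Spec_filter_candidates_by_answers (sample : List Int) (candidates : List Int) (candidate_features : List (Int × List Int)) (out : List Int) : Prop := out = filter_candidates_by_answers_alt sample candidates candidate_features
instance (sample : List Int) (candidates : List Int) (candidate_features : List (Int × List Int)) (out : List Int) : Decidable (Spec_filter_candidates_by_answers sample candidates candidate_features out) := by unfold Spec_filter_candidates_by_answers; infer_instance

-- ===== CLAIM (what is proved, stated in full; the proofs are below) =====
def Claim_equal_filter_candidates_by_answers : Prop := ∀ (sample : List Int) (candidates : List Int) (candidate_features : List (Int × List Int)), Dom_filter_candidates_by_answers sample candidates candidate_features → Pre_filter_candidates_by_answers sample candidates candidate_features → Spec_filter_candidates_by_answers sample candidates candidate_features (filter_candidates_by_answers sample candidates candidate_features)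

-- ===== LEMMAS AND PROOFS =====
-- A's inner loop decides the conjunction of the answered constraints
theorem pvA_loop_eq_all (candidate_features : List (Int × List Int)) (c : Int) (l : List (Int × Int)) :
    pvA_loop candidate_features c l
      = (l.filter (fun p => p.2 != -1)).all
          (fun p => PySem.List.pyGetD (pvA_row candidate_features c) p.1 0 == p.2) := by
  induction l with
  | nil => rfl
  | cons hd tl ih =>
    obtain ⟨q, a⟩ := hd
    by_cases h : a = -1
    · simp [pvA_loop, h, ih]
    · by_cases hm : PySem.List.pyGetD (pvA_row candidate_features c) q 0 = a
      · simp [pvA_loop, h, hm, ih]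
      · simp [pvA_loop, h, hm]

-- B's staged pool narrowing also decides the conjunction of the answered constraints
theorem pvB_foldl_eq_filter_all (candidate_features : List (Int × List Int))
    (l : List (Int × Int)) (acc : List Int) :
    l.foldl
        (fun survivors p =>
          if p.2 == -1 then survivors
          else survivors.filter (fun c =>
            PySem.List.pyGetD (((candidate_features.find? (fun r => r.1 == c)).map (·.2)).getD []) p.1 0 == p.2))
        acc
      = acc.filter (fun c =>
          (l.filter (fun p => p.2 != -1)).all
            (fun p => PySem.List.pyGetD (pvA_row candidate_features c) p.1 0 == p.2)) := by
  induction l generalizing acc with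
  | nil => simp
  | cons hd tl ih =>
    obtain ⟨q, a⟩ := hd
    rw [List.foldl_cons, ih, List.filter_cons]
    by_cases h : a = -1
    · rw [if_pos (by simp [h] : (((q, a).2 : Int) == -1) = true),
        if_neg (by simp [h] : ¬ (((q, a).2 : Int) != -1) = true)]
    · rw [if_neg (by simp [h] : ¬ (((q, a).2 : Int) == -1) = true),
        if_pos (by simp [h] : (((q, a).2 : Int) != -1) = true),
        List.filter_filter]
      refine List.filter_congr (fun c _ => ?_)
      rw [List.all_cons]
      simp [pvA_row, Bool.and_comm]

-- ===== VERDICT (by name: the statement is the Claim_ definition above) =====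
theorem filter_candidates_by_answers_spec : Claim_equal_filter_candidates_by_answers := by
  intro sample candidates candidate_features _ _
  unfold Spec_filter_candidates_by_answers
  unfold filter_candidates_by_answers filter_candidates_by_answers_alt
  rw [PySem.List.foldl_append_if
        (fun c => pvA_loop candidate_features c (PySem.List.enumerate sample 0)) (fun c => c),
      pvB_foldl_eq_filter_all]
  simp only [List.nil_append, List.map_id_fun', id]
  refine List.filter_congr (fun c _ => ?_)
  rw [pvA_loop_eq_all]
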